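-- pv_equiv track=rewrite | github.com/Arsen1302/Code-copy-detector | TestData/solutions/problem_1442_4.py | solution_1442_4
-- ===== SOURCE A (Python) =====
-- from typing import List
--
-- def solution_1442_4(plants: List[int], capacityA: int, capacityB: int) -> int:
--
--     # check whether they will reach the same plant (uneven array length)
--     same_plant = len(plants) % 2 == 1
--
--     # get the middle plant
--     mid_plant = len(plants)//2
--
--     # make the two buckets
--     a_bucket = capacityA
--     b_bucket = capacityB
--     fillups = 0
--     for idx in range(mid_plant):
--         # check alice
--         if a_bucket >= plants[idx]:
--             a_bucket -= plants[idx]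
--         else:
--             fillups += 1
--             a_bucket = capacityA - plants[idx]
--
--         # check bob
--         if b_bucket >= plants[-idx-1]:
--             b_bucket -= plants[-idx-1]
--         else:
--             fillups += 1
--             b_bucket = capacityB - plants[-idx-1]
--
--     # check whether we meet at the same place and need to refill there
--     leftover_plant = plants[mid_plant]
--     if same_plant and a_bucket < leftover_plant and b_bucket < leftover_plant:
--         fillups += 1
--
--     return fillups
-- ===== SOURCE B (Python) =====
-- from typing import List
--
-- def solution_1442_4(plants: List[int], capacityA: int, capacityB: int) -> int:
--     # Recursively peel one plant off each end; when one plant remains, it is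
--     # the meeting point: one refill iff both remaining water levels fall short.
--     def rec(seq: List[int], a: int, b: int) -> int:
--         if not seq:
--             return 0
--         if len(seq) == 1:
--             return 1 if a < seq[0] and b < seq[0] else 0
--         first, *middle, last = seq
--         fills = 0
--         if a >= first:
--             a -= first
--         else:
--             fills += 1
--             a = capacityA - first
--         if b >= last:
--             b -= last
--         else:
--             fills += 1
--             b = capacityB - last
--         return fills + rec(middle, a, b)
--     return rec(plants, capacityA, capacityB)
-- ===== Notes on version B (the rewrite author's own statement) =====
-- stated objective: alternative
-- what changed: Replaces A's indexed loop over range(len//2) with negative indexing plus a post-loop middle check by a recursive function that peels the first and last plant off the list at each step and handles the meeting plant as the single-element base case (trades speed for the recursive decomposition: each step copies the middle slice).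
-- outside the precondition, e.g. on solution_1442_4([], 1, 1): A raises IndexError, B returns 0
-- crash fix: On the empty plant list A raises IndexError (it unconditionally reads plants[len//2]); B returns 0. — e.g. on solution_1442_4([], 1, 1): A raises IndexError, B returns 0
import Mathlib
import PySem

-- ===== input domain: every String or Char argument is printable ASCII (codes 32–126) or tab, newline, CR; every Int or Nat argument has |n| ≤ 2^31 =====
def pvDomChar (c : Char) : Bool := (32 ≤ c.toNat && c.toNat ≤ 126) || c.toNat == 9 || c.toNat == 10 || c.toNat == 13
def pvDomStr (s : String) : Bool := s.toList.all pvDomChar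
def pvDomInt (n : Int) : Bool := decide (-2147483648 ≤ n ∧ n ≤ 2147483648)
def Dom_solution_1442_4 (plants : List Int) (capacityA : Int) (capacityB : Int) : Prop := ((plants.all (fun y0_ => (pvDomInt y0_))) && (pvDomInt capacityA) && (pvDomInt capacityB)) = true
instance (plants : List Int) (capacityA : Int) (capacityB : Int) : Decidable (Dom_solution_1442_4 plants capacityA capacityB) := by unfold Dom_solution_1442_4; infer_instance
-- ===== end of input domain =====

-- B replaces A's indexed half-loop (with negative indexing and a post-loop middle
-- check) by a recursion peeling the first and last plant each step, the meeting
-- plant handled in the base case (alternative recursive decomposition; slower on large inputs, the step copies the middle slice).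


-- ===== PORT A =====
def solution_1442_4 (plants : List Int) (capacityA : Int) (capacityB : Int) : Int :=
  let samePlant : Bool := plants.length % 2 == 1
  let midPlant : Nat := plants.length / 2
  let s := (PySem.List.pyRange 0 (midPlant : Int) 1).foldl (fun (s : Int × Int × Int) (idx : Int) =>
      let p := (PySem.List.pyGet? plants idx).getD 0
      let (a, f) := if s.1 ≥ p then (s.1 - p, s.2.2) else (capacityA - p, s.2.2 + 1)
      let q := (PySem.List.pyGet? plants (-idx - 1)).getD 0
      let (b, f) := if s.2.1 ≥ q then (s.2.1 - q, f) else (capacityB - q, f + 1)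
      (a, b, f)) (capacityA, capacityB, 0)
  let leftover := (PySem.List.pyGet? plants (midPlant : Int)).getD 0
  if samePlant ∧ s.1 < leftover ∧ s.2.1 < leftover then s.2.2 + 1 else s.2.2

-- ===== PORT B =====
-- recursion peeling first and last plant; single remaining plant = meeting point
def pvRec (cA cB : Int) : Nat → Int → Int → List Int → Int
  | _, _, _, [] => 0
  | _, a, b, [p] => if a < p ∧ b < p then 1 else 0
  | 0, _, _, _ => 0   -- fuel guard, unreachable when fuel ≥ length - 1
  | fuel + 1, a, b, p :: q :: rest =>
      let seq := q :: rest
      let last := seq.getLast (by simp)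
      let middle := seq.dropLast
      let af := if a ≥ p then (a - p, (0 : Int)) else (cA - p, 1)
      let bf := if b ≥ last then (b - last, (0 : Int)) else (cB - last, 1)
      af.2 + bf.2 + pvRec cA cB fuel af.1 bf.1 middle

def solution_1442_4_alt (plants : List Int) (capacityA : Int) (capacityB : Int) : Int :=
  pvRec capacityA capacityB plants.length capacityA capacityB plants

-- ===== PRECONDITION & SPEC =====
-- A unconditionally reads plants[len//2], which raises IndexError exactly when plants = [].
def Pre_solution_1442_4 (plants : List Int) (capacityA : Int) (capacityB : Int) : Prop := plants ≠ []
instance (plants : List Int) (capacityA : Int) (capacityB : Int) : Decidable (Pre_solution_1442_4 plants capacityA capacityB) := by unfold Pre_solution_1442_4; infer_instance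
def pvWitness_solution_1442_4 : List Int × Int × Int := ([2, 1, 3], 4, 4)

-- On the empty plant list A raises IndexError (it reads plants[0]); B returns 0.
def Raises_solution_1442_4 (plants : List Int) (capacityA : Int) (capacityB : Int) : Prop := plants = []
instance (plants : List Int) (capacityA : Int) (capacityB : Int) : Decidable (Raises_solution_1442_4 plants capacityA capacityB) := by unfold Raises_solution_1442_4; infer_instance
def pvRaiseWitness_solution_1442_4 : List Int × Int × Int := ([], 1, 1)
def pvRaiseWitnessOut_solution_1442_4 : Int := 0

def Spec_solution_1442_4 (plants : List Int) (capacityA : Int) (capacityB : Int) (out : Int) : Prop := out = solution_1442_4_alt plants capacityA capacityB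
instance (plants : List Int) (capacityA : Int) (capacityB : Int) (out : Int) : Decidable (Spec_solution_1442_4 plants capacityA capacityB out) := by unfold Spec_solution_1442_4; infer_instance

-- ===== CLAIM (what is proved, stated in full; the proofs are below) =====
def Claim_equal_solution_1442_4 : Prop := ∀ (plants : List Int) (capacityA : Int) (capacityB : Int), Dom_solution_1442_4 plants capacityA capacityB → Pre_solution_1442_4 plants capacityA capacityB → Spec_solution_1442_4 plants capacityA capacityB (solution_1442_4 plants capacityA capacityB)
def Claim_raises_solution_1442_4 : Prop := (∀ (plants : List Int) (capacityA : Int) (capacityB : Int), Dom_solution_1442_4 plants capacityA capacityB → Raises_solution_1442_4 plants capacityA capacityB → ¬ Pre_solution_1442_4 plants capacityA capacityB) ∧ (Dom_solution_1442_4 (pvRaiseWitness_solution_1442_4.1) (pvRaiseWitness_solution_1442_4.2.1) (pvRaiseWitness_solution_1442_4.2.2) ∧ Raises_solution_1442_4 (pvRaiseWitness_solution_1442_4.1) (pvRaiseWitness_solution_1442_4.2.1) (pvRaiseWitness_solution_1442_4.2.2) ∧ solution_1442_4_alt (pvRaiseWitness_solution_1442_4.1) (pvRaiseWitness_solution_1442_4.2.1)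 (pvRaiseWitness_solution_1442_4.2.2) = pvRaiseWitnessOut_solution_1442_4)

-- ===== LEMMAS AND PROOFS =====
-- one-bucket simulation with capacity c, initial water a: (refills, water left)
def pvSim (c a : Int) (l : List Int) : Int × Int :=
  l.foldl (fun s p => if s.2 ≥ p then (s.1, s.2 - p) else (s.1 + 1, c - p)) (0, a)

theorem pvSim_append (l : List Int) (p c a : Int) :
    pvSim c a (l ++ [p]) =
      (if (pvSim c a l).2 ≥ p then ((pvSim c a l).1, (pvSim c a l).2 - p)
       else ((pvSim c a l).1 + 1, c - p)) := by
  simp [pvSim, List.foldl_append]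

theorem pvSim_shift (c : Int) : ∀ (l : List Int) (a k : Int),
    l.foldl (fun s p => if s.2 ≥ p then (s.1, s.2 - p) else (s.1 + 1, c - p)) (k, a)
      = (k + (pvSim c a l).1, (pvSim c a l).2) := by
  intro l
  induction l with
  | nil => intro a k; simp [pvSim]
  | cons p t ih =>
    intro a k
    simp only [pvSim, List.foldl_cons]
    by_cases h : a ≥ p
    · simp only [h, if_pos]
      rw [ih (a - p) k, ih (a - p) 0]; simp
    · simp only [h, if_neg, not_false_iff]
      rw [ih (c - p) (k + 1), ih (c - p) (0 + 1)]
      simp [Prod.ext_iff]; ring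

theorem pvSim_cons (c a p : Int) (l : List Int) :
    pvSim c a (p :: l) =
      (if a ≥ p then ((pvSim c (a - p) l).1, (pvSim c (a - p) l).2)
       else ((pvSim c (c - p) l).1 + 1, (pvSim c (c - p) l).2)) := by
  by_cases h : a ≥ p
  · simp only [pvSim, List.foldl_cons, if_pos h]
  · simp only [pvSim, List.foldl_cons, if_neg h]
    rw [pvSim_shift c l (c - p) (0 + 1)]
    simp [pvSim, Prod.ext_iff]
    omega

-- A's interleaved loop computed as the two per-end simulations
theorem pv_interleave (plants : List Int) (cA cB : Int) (k : Nat) (hk : k ≤ plants.length) :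
    (PySem.List.pyRange 0 (k : Int) 1).foldl (fun (s : Int × Int × Int) (idx : Int) =>
      let p := (PySem.List.pyGet? plants idx).getD 0
      let (a, f) := if s.1 ≥ p then (s.1 - p, s.2.2) else (cA - p, s.2.2 + 1)
      let q := (PySem.List.pyGet? plants (-idx - 1)).getD 0
      let (b, f) := if s.2.1 ≥ q then (s.2.1 - q, f) else (cB - q, f + 1)
      (a, b, f)) (cA, cB, 0)
    = ((pvSim cA cA (plants.take k)).2, (pvSim cB cB (plants.reverse.take k)).2,
       (pvSim cA cA (plants.take k)).1 + (pvSim cB cB (plants.reverse.take k)).1) := by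
  induction k with
  | zero => simp [pvSim]
  | succ k ih =>
    have hk' : k < plants.length := hk
    have hkr : k < plants.reverse.length := by simpa using hk'
    have hp : PySem.List.pyGet? plants (k : Int) = some plants[k] := by
      rw [PySem.List.pyGet?_natCast]; simp [hk']
    have hq : PySem.List.pyGet? plants (-(k : Int) - 1) = some plants.reverse[k] := by
      have he : -(k : Int) - 1 = -((k + 1 : Nat) : Int) := by push_cast; ring
      rw [he, PySem.List.pyGet?_neg_natCast _ _ (by omega) (by omega)]
      have hlt : plants.length - (k + 1) < plants.length := by omega
      simp [List.getElem_reverse, hlt]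
      congr 1
      omega
    have htake : plants.take (k + 1) = plants.take k ++ [plants[k]] := by
      rw [List.take_add_one]; simp [hk']
    have hrtake : plants.reverse.take (k + 1) = plants.reverse.take k ++ [plants.reverse[k]] := by
      rw [List.take_add_one]; simp [List.getElem?_eq_getElem hkr]
    have hcast : ((k + 1 : Nat) : Int) = (k : Int) + 1 := by push_cast; ring
    rw [hcast, PySem.List.pyRange_one_succ_right (by positivity), List.foldl_append, ih (by omega)]
    simp only [List.foldl_cons, List.foldl_nil, hp, hq, htake, hrtake,
      pvSim_append, Option.getD_some]
    split_ifs <;> simp <;> ring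

-- B's recursion computed as the two per-end simulations plus the middle indicator
theorem pvRec_eq (cA cB : Int) : ∀ (fuel : Nat) (l : List Int) (a b : Int), l.length ≤ fuel + 1 →
    pvRec cA cB fuel a b l =
      (pvSim cA a (l.take (l.length / 2))).1 + (pvSim cB b (l.reverse.take (l.length / 2))).1 +
      (if l.length % 2 = 1
          ∧ (pvSim cA a (l.take (l.length / 2))).2 < (PySem.List.pyGet? l ((l.length / 2 : Nat) : Int)).getD 0
          ∧ (pvSim cB b (l.reverse.take (l.length / 2))).2 < (PySem.List.pyGet? l ((l.length / 2 : Nat) : Int)).getD 0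
       then 1 else 0) := by
  intro fuel
  induction fuel with
  | zero =>
    intro l a b hl
    match l with
    | [] => simp [pvRec, pvSim]
    | [p] =>
      simp [pvRec, pvSim, PySem.List.pyGet?, PySem.List.pyIdx?]
    | p :: q :: rest => simp at hl
  | succ fuel ih =>
    intro l a b hl
    match l with
    | [] => simp [pvRec, pvSim]
    | [p] =>
      simp [pvRec, pvSim, PySem.List.pyGet?, PySem.List.pyIdx?]
    | p :: q :: rest =>
      set seq := q :: rest with hseq
      have hne : seq ≠ [] := by simp [hseq]
      set lst := seq.getLast hne with hlast
      set xs := seq.dropLast with hxs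
      have hsplit : seq = xs ++ [lst] := by
        rw [hxs, hlast]; exact (List.dropLast_append_getLast hne).symm
      have hlen : (p :: seq).length = xs.length + 2 := by
        rw [hsplit]; simp
      have hxn : xs.length ≤ fuel + 1 := by
        have h2 := hl; rw [hlen] at h2; omega
      set m := xs.length / 2 with hm
      have hml : (p :: seq).length / 2 = m + 1 := by rw [hlen]; omega
      have hmle : m ≤ xs.length := by omega
      have htake : (p :: seq).take ((p :: seq).length / 2) = p :: xs.take m := by
        rw [hml, hsplit, List.take_succ_cons, List.take_append_of_le_length hmle]
      have hrev : (p :: seq).reverse = lst :: (xs.reverse ++ [p]) := by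
        rw [hsplit]; simp
      have hrtake : (p :: seq).reverse.take ((p :: seq).length / 2)
          = lst :: xs.reverse.take m := by
        rw [hml, hrev, List.take_succ_cons,
          List.take_append_of_le_length (by simpa using hmle)]
      have hpar : (p :: seq).length % 2 = xs.length % 2 := by rw [hlen]; omega
      have hmidv : xs.length % 2 = 1 →
          (PySem.List.pyGet? (p :: seq) (((p :: seq).length / 2 : Nat) : Int)).getD 0
            = (PySem.List.pyGet? xs ((m : Nat) : Int)).getD 0 := by
        intro hodd
        have hmlt : m < xs.length := by omega
        rw [PySem.List.pyGet?_natCast, PySem.List.pyGet?_natCast, hml]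
        simp only [List.getElem?_cons_succ]
        rw [hsplit, List.getElem?_append_left hmlt]
      have hstep : pvRec cA cB (fuel + 1) a b (p :: seq) =
          (if a ≥ p then (a - p, (0 : Int)) else (cA - p, 1)).2
          + (if b ≥ lst then (b - lst, (0 : Int)) else (cB - lst, 1)).2
          + pvRec cA cB fuel
              (if a ≥ p then (a - p, (0 : Int)) else (cA - p, 1)).1
              (if b ≥ lst then (b - lst, (0 : Int)) else (cB - lst, 1)).1 xs := by
        rw [hseq, pvRec]
      rw [hstep, ih xs _ _ hxn, htake, hrtake, pvSim_cons, pvSim_cons, hpar, ← hm]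
      by_cases ha : a ≥ p <;> by_cases hb : b ≥ lst <;>
        simp only [ha, hb, if_pos, if_neg, not_false_iff] <;>
        · by_cases hodd : xs.length % 2 = 1
          · rw [hmidv hodd]
            simp only [hodd, true_and]
            split_ifs <;> ring
          · simp only [hodd, false_and, if_false]
            ring

-- ===== VERDICT (by name: the statement is the Claim_ definition above) =====
theorem solution_1442_4_spec : Claim_equal_solution_1442_4 := by
  intro plants cA cB _ hpre
  unfold Spec_solution_1442_4 solution_1442_4_alt
  have hmid : plants.length / 2 ≤ plants.length := Nat.div_le_self _ _
  have hfuel : plants.length ≤ plants.length + 1 := by omega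
  rw [pvRec_eq cA cB plants.length plants cA cB hfuel]
  simp only [solution_1442_4, pv_interleave plants cA cB _ hmid, beq_iff_eq]
  split_ifs with h1
  · ring
  · ring

@[simp] theorem solution_1442_4_raises : Claim_raises_solution_1442_4 := by
  unfold Claim_raises_solution_1442_4
  exact ⟨fun plants cA cB _ hr => by
      simp [Pre_solution_1442_4, Raises_solution_1442_4] at *; exact hr,
    by decide⟩
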